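-- pv_equiv track=rewrite | github.com/makinadeideias/lexica | ss.py | mostrar_palavra_com_dica
-- ===== SOURCE A (Python) =====
-- def mostrar_palavra_com_dica(palavra, letras_reveladas=None):
--     """Mostra a palavra com letras reveladas e escondidas"""
--     if letras_reveladas is None:
--         letras_reveladas = []
--
--     display = []
--     for i in range(len(palavra)):
--         if any(pos == i for pos, _ in letras_reveladas):
--             display.append(palavra[i].upper())
--         else:
--             display.append("_")
--     return " ".join(display)
-- ===== SOURCE B (Python) =====
-- def mostrar_palavra_com_dica(palavra, letras_reveladas=None):
--     """Mostra a palavra com letras reveladas e escondidas"""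
--     display = ["_"] * len(palavra)
--     for pos, _ in (letras_reveladas or []):
--         if 0 <= pos < len(palavra):
--             display[pos] = palavra[pos].upper()
--     return " ".join(display)
-- ===== Notes on version B (the rewrite author's own statement) =====
-- stated objective: faster
-- what changed: Scatters revealed positions into a preallocated underscore list in one pass over letras_reveladas (with an in-range guard), instead of scanning letras_reveladas with any() for every index of the word.
import Mathlib
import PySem

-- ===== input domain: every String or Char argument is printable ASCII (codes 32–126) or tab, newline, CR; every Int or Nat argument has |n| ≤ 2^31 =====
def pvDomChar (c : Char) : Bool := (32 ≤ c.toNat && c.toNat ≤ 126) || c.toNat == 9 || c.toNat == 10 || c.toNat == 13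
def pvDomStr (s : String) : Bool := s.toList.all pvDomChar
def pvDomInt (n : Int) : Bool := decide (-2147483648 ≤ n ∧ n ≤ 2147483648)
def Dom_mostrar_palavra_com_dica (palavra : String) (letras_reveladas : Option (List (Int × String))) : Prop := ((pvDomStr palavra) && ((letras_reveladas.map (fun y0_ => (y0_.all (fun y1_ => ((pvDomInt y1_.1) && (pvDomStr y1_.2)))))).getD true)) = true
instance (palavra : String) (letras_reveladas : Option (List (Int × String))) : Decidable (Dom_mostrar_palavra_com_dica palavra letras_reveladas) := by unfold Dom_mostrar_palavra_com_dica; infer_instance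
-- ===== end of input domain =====

-- B replaces A's per-index any() scan by a single scatter pass over letras_reveladas
-- into a preallocated underscore list (objective: faster, O(n+m) instead of O(n*m)).

-- ===== PORT A =====
def mostrar_palavra_com_dica (palavra : String) (letras_reveladas : Option (List (Int × String))) : String :=
  let lrl := letras_reveladas.getD []
  let display : List String :=
    (PySem.List.pyRange 0 (palavra.toList.length : Int) 1).foldl
      (fun acc i =>
        if lrl.any (fun pr => pr.1 == i) then
          acc ++ [PySem.Str.upper (String.singleton (PySem.List.pyGetD palavra.toList i ' '))]
        else
          acc ++ ["_"]) []
  PySem.Str.join " " display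

-- ===== PORT B =====
def mostrar_palavra_com_dica_alt (palavra : String) (letras_reveladas : Option (List (Int × String))) : String :=
  let lrl := letras_reveladas.getD []
  let display : List String :=
    lrl.foldl
      (fun acc pr =>
        if 0 ≤ pr.1 ∧ pr.1 < (palavra.toList.length : Int) then
          PySem.List.pySetD acc pr.1 (PySem.Str.upper (String.singleton (PySem.List.pyGetD palavra.toList pr.1 ' ')))
        else acc)
      (List.replicate palavra.toList.length "_")
  PySem.Str.join " " display

-- ===== PRECONDITION & SPEC =====
def Spec_mostrar_palavra_com_dica (palavra : String) (letras_reveladas : Option (List (Int × String))) (out : String) : Prop := out = mostrar_palavra_com_dica_alt palavra letras_reveladas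
instance (palavra : String) (letras_reveladas : Option (List (Int × String))) (out : String) : Decidable (Spec_mostrar_palavra_com_dica palavra letras_reveladas out) := by unfold Spec_mostrar_palavra_com_dica; infer_instance

-- ===== CLAIM (what is proved, stated in full; the proofs are below) =====
def Claim_equal_mostrar_palavra_com_dica : Prop := ∀ (palavra : String) (letras_reveladas : Option (List (Int × String))), Dom_mostrar_palavra_com_dica palavra letras_reveladas → Spec_mostrar_palavra_com_dica palavra letras_reveladas (mostrar_palavra_com_dica palavra letras_reveladas)

-- ===== LEMMAS AND PROOFS =====

-- the revealed-letter string written at position i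
def pvU (cs : List Char) (i : Int) : String :=
  PySem.Str.upper (String.singleton (PySem.List.pyGetD cs i ' '))

-- B's scatter loop: invariant on every cell, by induction on the revealed list
theorem scatter_getElem? (cs : List Char) (lrl : List (Int × String)) (acc : List String)
    (h : acc.length = cs.length) :
    (lrl.foldl
      (fun acc pr =>
        if 0 ≤ pr.1 ∧ pr.1 < (cs.length : Int) then
          PySem.List.pySetD acc pr.1 (pvU cs pr.1)
        else acc) acc).length = cs.length ∧
    ∀ k : Nat, (lrl.foldl
      (fun acc pr =>
        if 0 ≤ pr.1 ∧ pr.1 < (cs.length : Int) then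
          PySem.List.pySetD acc pr.1 (pvU cs pr.1)
        else acc) acc)[k]? =
        (if k < cs.length ∧ lrl.any (fun pr => pr.1 == (k : Int)) then some (pvU cs k) else acc[k]?) := by
  induction lrl generalizing acc with
  | nil => simp [h]
  | cons p t ih =>
    simp only [List.foldl_cons]
    set acc' := (if 0 ≤ p.1 ∧ p.1 < (cs.length : Int) then
          PySem.List.pySetD acc p.1 (pvU cs p.1) else acc) with hacc'
    have hlen' : acc'.length = cs.length := by
      rw [hacc']; split <;> simp [PySem.List.length_pySetD, h]
    obtain ⟨hL, hK⟩ := ih acc' hlen'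
    refine ⟨hL, fun k => ?_⟩
    rw [hK k]
    by_cases hk : k < cs.length
    · by_cases hp : p.1 = (k : Int)
      · -- this pair writes cell k: guard holds, cell becomes pvU cs k
        have hg : 0 ≤ p.1 ∧ p.1 < (cs.length : Int) := by omega
        have hset : acc'[k]? = some (pvU cs k) := by
          rw [hacc', if_pos hg, hp, PySem.List.pySetD_natCast]
          rw [List.getElem?_set_self (by omega)]
        simp [hp, hk, hset]
    -- other cell / out of range: this pair leaves cell k unchanged
      · have hsame : acc'[k]? = acc[k]? := by
          rw [hacc']
          split
          · rename_i hg
            rw [PySem.List.pySetD_of_nonneg _ _ hg.1]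
            exact List.getElem?_set_ne (by omega)
          · rfl
        have hb : (p.1 == (k : Int)) = false := beq_eq_false_iff_ne.mpr hp
        rw [hsame, List.any_cons, hb, Bool.false_or]
    · have hsame : acc'[k]? = acc[k]? := by
        rw [hacc']
        split
        · rename_i hg
          rw [PySem.List.pySetD_of_nonneg _ _ hg.1]
          exact List.getElem?_set_ne (by omega)
        · rfl
      simp [hk, hsame]

-- A's gather loop is the pointwise map over the index range
theorem gather_eq_map (cs : List Char) (lrl : List (Int × String)) :
    ((PySem.List.pyRange 0 (cs.length : Int) 1).foldl
      (fun acc i =>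
        if lrl.any (fun pr => pr.1 == i) then acc ++ [pvU cs i] else acc ++ ["_"]) []) =
    (List.range cs.length).map
      (fun (k : Nat) => if lrl.any (fun pr => pr.1 == (k : Int)) then pvU cs (k : Int) else "_") := by
  have hf : (fun (acc : List String) i =>
        if lrl.any (fun pr => pr.1 == i) then acc ++ [pvU cs i] else acc ++ ["_"]) =
      (fun acc i => acc ++ [if lrl.any (fun pr => pr.1 == i) then pvU cs i else "_"]) := by
    funext acc i; split <;> rfl
  rw [hf, PySem.List.foldl_append_singleton_eq_map, PySem.List.pyRange_zero_natCast]
  simp [List.map_map, Function.comp]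

-- the two display lists coincide
theorem display_eq (cs : List Char) (lrl : List (Int × String)) :
    ((PySem.List.pyRange 0 (cs.length : Int) 1).foldl
      (fun acc i =>
        if lrl.any (fun pr => pr.1 == i) then acc ++ [pvU cs i] else acc ++ ["_"]) []) =
    (lrl.foldl
      (fun acc pr =>
        if 0 ≤ pr.1 ∧ pr.1 < (cs.length : Int) then
          PySem.List.pySetD acc pr.1 (pvU cs pr.1)
        else acc) (List.replicate cs.length "_")) := by
  obtain ⟨hL, hK⟩ := scatter_getElem? cs lrl (List.replicate cs.length "_")
    (List.length_replicate)
  rw [gather_eq_map]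
  apply List.ext_getElem?
  intro k
  rw [hK k]
  by_cases hk : k < cs.length
  · rw [List.getElem?_map, List.getElem?_range hk]
    by_cases ha : lrl.any (fun pr => pr.1 == (k : Int))
    · simp [hk, ha]
    · simp [hk, ha]
  · rw [List.getElem?_eq_none (by simpa using Nat.le_of_not_lt hk)]
    simp [hk]

-- ===== VERDICT (by name: the statement is the Claim_ definition above) =====
theorem mostrar_palavra_com_dica_spec : Claim_equal_mostrar_palavra_com_dica := by
  intro palavra letras_reveladas _
  unfold Spec_mostrar_palavra_com_dica mostrar_palavra_com_dica mostrar_palavra_com_dica_alt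
  simp only
  rw [show (fun (acc : List String) (i : Int) =>
      if (letras_reveladas.getD []).any (fun pr => pr.1 == i) then
        acc ++ [PySem.Str.upper (String.singleton (PySem.List.pyGetD palavra.toList i ' '))]
      else acc ++ ["_"]) = (fun acc i =>
      if (letras_reveladas.getD []).any (fun pr => pr.1 == i) then
        acc ++ [pvU palavra.toList i] else acc ++ ["_"]) from rfl]
  rw [display_eq palavra.toList (letras_reveladas.getD [])]
  rfl
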